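-- pv_equiv track=rewrite | github.com/KDesp73/irida | training/convert_pt_to_nnue.py | leb128_encode_signed
-- ===== SOURCE A (Python) =====
-- def leb128_encode_signed(value: int) -> list[int]:
--     """Encode a signed int as LEB128 bytes."""
--     out = []
--     while True:
--         byte = value & 0x7F
--         value >>= 7
--         if (value == 0 and (byte & 0x40) == 0) or (value == -1 and (byte & 0x40) != 0):
--             out.append(byte)
--             break
--         out.append(byte | 0x80)
--     return out
-- ===== SOURCE B (Python) =====
-- def leb128_encode_signed(value: int) -> list[int]:
--     """Encode a signed int as LEB128 bytes."""
--     bits = (value.bit_length() if value >= 0 else (-value - 1).bit_length()) + 1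
--     n = max(1, (bits + 6) // 7)
--     return [((value >> (7 * i)) & 0x7F) | (0x80 if i < n - 1 else 0)
--             for i in range(n)]
-- ===== Notes on version B (the rewrite author's own statement) =====
-- stated objective: alternative
-- what changed: A emits bytes in a data-dependent while-loop that stops when the shifted value and the sign bit agree; B instead computes the exact byte count in closed form from the bit length (adding a sign bit and ceiling-dividing by seven, with a minimum of one byte) and extracts all bytes in a single counted comprehension.
import Mathlib
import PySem

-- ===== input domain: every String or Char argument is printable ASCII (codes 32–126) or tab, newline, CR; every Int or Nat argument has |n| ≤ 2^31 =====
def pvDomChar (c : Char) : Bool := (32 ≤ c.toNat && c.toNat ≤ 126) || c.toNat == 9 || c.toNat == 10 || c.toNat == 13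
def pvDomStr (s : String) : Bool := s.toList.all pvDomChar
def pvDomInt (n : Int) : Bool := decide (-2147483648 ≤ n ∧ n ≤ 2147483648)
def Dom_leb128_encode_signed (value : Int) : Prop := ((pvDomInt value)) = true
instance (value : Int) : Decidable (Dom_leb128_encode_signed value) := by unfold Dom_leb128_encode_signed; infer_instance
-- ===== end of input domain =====

-- B re-implements LEB128 signed encoding by computing the byte count in closed form from the
-- bit length and extracting all bytes in one counted comprehension (alternative decomposition,
-- no measured speed claim).

-- ===== PORT A =====
-- The while-True loop is ported with a fuel counter that only makes the same computation total:
-- each non-final iteration strictly shrinks |value| (pvFuel_decr below), so fuel |value|+1 is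
-- never exhausted and the [] base case is unreachable.
def pvLebGo : Nat → Int → List Int
  | 0, _ => []
  | fuel + 1, value =>
    let byte := PySem.Int.band value 127
    let value' := value >>> (7 : Nat)
    if (value' = 0 ∧ PySem.Int.band byte 64 = 0) ∨
       (value' = -1 ∧ ¬ PySem.Int.band byte 64 = 0) then
      [byte]
    else
      PySem.Int.bor byte 128 :: pvLebGo fuel value'

def leb128_encode_signed (value : Int) : List Int :=
  pvLebGo (value.natAbs + 1) value

-- ===== PORT B =====
def leb128_encode_signed_alt (value : Int) : List Int :=
  let bits : Nat := (if 0 ≤ value then PySem.Int.bitLength value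
                     else PySem.Int.bitLength (-value - 1)) + 1
  let n : Nat := max 1 ((bits + 6) / 7)
  (List.range n).map (fun i =>
    PySem.Int.bor (PySem.Int.band (value >>> (7 * i : Nat)) 127)
      (if i < n - 1 then 128 else 0))

-- ===== PRECONDITION & SPEC =====
def Spec_leb128_encode_signed (value : Int) (out : List Int) : Prop := out = leb128_encode_signed_alt value
instance (value : Int) (out : List Int) : Decidable (Spec_leb128_encode_signed value out) := by unfold Spec_leb128_encode_signed; infer_instance

-- ===== CLAIM (what is proved, stated in full; the proofs are below) =====
def Claim_equal_leb128_encode_signed : Prop := ∀ (value : Int), Dom_leb128_encode_signed value → Spec_leb128_encode_signed value (leb128_encode_signed value)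

-- ===== LEMMAS AND PROOFS =====

theorem pvShiftR7 (v : Int) : v >>> (7 : Nat) = v / 128 := by
  have h := Int.shiftRight_eq_div_pow v 7
  norm_num at h
  exact h

theorem pvBand127 (v : Int) : PySem.Int.band v 127 = v % 128 := by
  cases v with
  | ofNat n =>
    show PySem.Int.band ((n : Nat) : Int) 127 = ((n : Nat) : Int) % 128
    have h1 : PySem.Int.band ((n : Nat) : Int) ((127 : Nat) : Int) = ((n &&& 127 : Nat) : Int) :=
      PySem.Int.band_natCast n 127
    have h2 : n &&& 127 = n % 128 := by
      have := Nat.and_two_pow_sub_one_eq_mod n 7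
      norm_num at this
      exact this
    rw [h2] at h1
    norm_num at h1
    rw [h1]
  | negSucc n =>
    have h0 : ¬ (0 ≤ Int.negSucc n) := by omega
    have h1 : PySem.Int.band (Int.negSucc n) 127
        = ((127 - (127 &&& (-(Int.negSucc n) - 1).toNat) : Nat) : Int) := by
      simp [PySem.Int.band, h0]
    have h2 : (-(Int.negSucc n) - 1).toNat = n := by omega
    rw [h2] at h1
    have h3 : 127 &&& n = n % 128 := by
      rw [Nat.land_comm]
      have := Nat.and_two_pow_sub_one_eq_mod n 7
      norm_num at this
      exact this
    rw [h3] at h1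
    have h4 : n % 128 < 128 := Nat.mod_lt _ (by norm_num)
    rw [h1]
    omega

theorem pvBand64 (b : Int) (h0 : 0 ≤ b) (h1 : b < 128) :
    PySem.Int.band b 64 = 0 ↔ b < 64 := by
  have hb : PySem.Int.band b 64 = ((b.toNat &&& 64 : Nat) : Int) :=
    PySem.Int.band_of_nonneg h0 (by norm_num)
  have h2 : b.toNat &&& 64 = (b.toNat.testBit 6).toNat * 64 := by
    have := Nat.and_two_pow b.toNat 6
    norm_num at this
    exact this
  have h3 : b.toNat.testBit 6 = decide (b.toNat / 2 ^ 6 % 2 = 1) :=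
    Nat.testBit_eq_decide_div_mod_eq
  rw [hb, h2, h3]
  by_cases hc : b.toNat / 2 ^ 6 % 2 = 1
  · simp only [hc, decide_true, Bool.toNat_true]
    norm_num at hc ⊢
    omega
  · simp only [hc, decide_false, Bool.toNat_false]
    norm_num at hc ⊢
    omega

theorem pvStop_iff (v : Int) :
    ((v >>> (7 : Nat) = 0 ∧ PySem.Int.band (PySem.Int.band v 127) 64 = 0) ∨
     (v >>> (7 : Nat) = -1 ∧ ¬ PySem.Int.band (PySem.Int.band v 127) 64 = 0)) ↔
    (-64 ≤ v ∧ v ≤ 63) := by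
  have hbyte0 : 0 ≤ v % 128 := Int.emod_nonneg v (by norm_num)
  have hbyte1 : v % 128 < 128 := Int.emod_lt_of_pos v (by norm_num)
  rw [pvShiftR7, pvBand127, pvBand64 _ hbyte0 hbyte1]
  omega


/-- The nonnegative "magnitude" whose bit length B measures. -/
def pvM (v : Int) : Int := if 0 ≤ v then v else -v - 1

/-- The byte count B computes. -/
def pvN (v : Int) : Nat := max 1 ((PySem.Int.bitLength (pvM v) + 1 + 6) / 7)

theorem pvAlt_eq (v : Int) :
    leb128_encode_signed_alt v = (List.range (pvN v)).map (fun i =>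
      PySem.Int.bor (PySem.Int.band (v >>> (7 * i : Nat)) 127)
        (if i < pvN v - 1 then 128 else 0)) := by
  simp [leb128_encode_signed_alt, pvN, pvM, apply_ite]

theorem pvM_nonneg (v : Int) : 0 ≤ pvM v := by
  simp only [pvM]; split <;> omega

theorem pvM_shift (v : Int) : pvM (v >>> (7 : Nat)) = (((pvM v).toNat / 128 : Nat) : Int) := by
  simp only [pvM, pvShiftR7]
  split_ifs <;> omega

theorem pvBL_le_iff (m : Nat) (k : Nat) : PySem.Int.bitLength (m : Int) ≤ k ↔ m < 2 ^ k := by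
  constructor
  · intro h
    have h1 := PySem.Int.lt_two_pow_bitLength (m : Int)
    have h2 : ((m : Int)).natAbs = m := Int.natAbs_natCast m
    have h3 : 2 ^ PySem.Int.bitLength (m : Int) ≤ 2 ^ k := Nat.pow_le_pow_right (by norm_num) h
    omega
  · intro h
    by_contra hk
    have hk2 := Nat.lt_of_not_le hk
    have hm0 : m ≠ 0 := by
      intro h0
      rw [h0] at hk
      have : PySem.Int.bitLength ((0 : Nat) : Int) = 0 := by
        norm_num [PySem.Int.bitLength_zero]
      omega
    have h1 := PySem.Int.two_pow_bitLength_le (m : Int) (by exact_mod_cast hm0)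
    have h2 : ((m : Int)).natAbs = m := Int.natAbs_natCast m
    have h3 : 2 ^ k ≤ 2 ^ (PySem.Int.bitLength (m : Int) - 1) :=
      Nat.pow_le_pow_right (by norm_num) (by omega)
    omega

theorem pvBL_div128 (m : Nat) (h : 128 ≤ m) :
    PySem.Int.bitLength (m : Int) = PySem.Int.bitLength ((m / 128 : Nat) : Int) + 7 := by
  have h1 := PySem.Int.bitLength_natCast (m := m) (by omega)
  have h2 := PySem.Int.bitLength_natCast (m := m / 2) (by omega)
  have h3 := PySem.Int.bitLength_natCast (m := m / 4) (by omega)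
  have h4 := PySem.Int.bitLength_natCast (m := m / 8) (by omega)
  have h5 := PySem.Int.bitLength_natCast (m := m / 16) (by omega)
  have h6 := PySem.Int.bitLength_natCast (m := m / 32) (by omega)
  have h7 := PySem.Int.bitLength_natCast (m := m / 64) (by omega)
  have e2 : m / 2 / 2 = m / 4 := by omega
  have e3 : m / 4 / 2 = m / 8 := by omega
  have e4 : m / 8 / 2 = m / 16 := by omega
  have e5 : m / 16 / 2 = m / 32 := by omega
  have e6 : m / 32 / 2 = m / 64 := by omega
  have e7 : m / 64 / 2 = m / 128 := by omega
  rw [e2] at h2; rw [e3] at h3; rw [e4] at h4; rw [e5] at h5; rw [e6] at h6; rw [e7] at h7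
  omega

theorem pvM_cast (v : Int) : pvM v = (((pvM v).toNat : Nat) : Int) :=
  (Int.toNat_of_nonneg (pvM_nonneg v)).symm

theorem pvN_base (v : Int) (h : -64 ≤ v ∧ v ≤ 63) : pvN v = 1 := by
  have hm : (pvM v).toNat < 64 := by
    simp only [pvM]; split <;> omega
  have hbl : PySem.Int.bitLength (((pvM v).toNat : Nat) : Int) ≤ 6 := by
    rw [pvBL_le_iff, show (2 : Nat) ^ 6 = 64 from by norm_num]
    omega
  rw [pvN, pvM_cast]
  omega

theorem pvN_step (v : Int) (h : ¬ (-64 ≤ v ∧ v ≤ 63)) :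
    pvN v = pvN (v >>> (7 : Nat)) + 1 := by
  have hm : 64 ≤ (pvM v).toNat := by
    simp only [pvM]; split <;> omega
  have hshift : pvM (v >>> (7 : Nat)) = (((pvM v).toNat / 128 : Nat) : Int) := pvM_shift v
  by_cases hbig : 128 ≤ (pvM v).toNat
  · have hdiv := pvBL_div128 (pvM v).toNat hbig
    rw [pvN, pvN, pvM_cast v, hshift, hdiv]
    omega
  · -- 64 ≤ m < 128 : exactly two bytes
    have hm0 : (pvM v).toNat / 128 = 0 := by omega
    have hbl7 : PySem.Int.bitLength (((pvM v).toNat : Nat) : Int) = 7 := by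
      have hle : PySem.Int.bitLength (((pvM v).toNat : Nat) : Int) ≤ 7 := by
        rw [pvBL_le_iff, show (2 : Nat) ^ 7 = 128 from by norm_num]
        omega
      have hgt : ¬ PySem.Int.bitLength (((pvM v).toNat : Nat) : Int) ≤ 6 := by
        rw [pvBL_le_iff, show (2 : Nat) ^ 6 = 64 from by norm_num]
        omega
      omega
    have hbl0 : PySem.Int.bitLength ((0 : Nat) : Int) = 0 := by
      norm_num [PySem.Int.bitLength_zero]
    rw [pvN, pvN, pvM_cast v, hshift, hm0, hbl7, hbl0]
    omega

theorem pvShift_zero (v : Int) : v >>> (0 : Nat) = v := by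
  rw [Int.shiftRight_eq_div_pow]
  simp

theorem pvAlt_base (v : Int) (h : -64 ≤ v ∧ v ≤ 63) :
    leb128_encode_signed_alt v = [PySem.Int.band v 127] := by
  rw [pvAlt_eq, pvN_base v h]
  simp

theorem pvAlt_step (v : Int) (h : ¬ (-64 ≤ v ∧ v ≤ 63)) :
    leb128_encode_signed_alt v =
      PySem.Int.bor (PySem.Int.band v 127) 128 :: leb128_encode_signed_alt (v >>> (7 : Nat)) := by
  rw [pvAlt_eq, pvAlt_eq, pvN_step v h]
  have hn1 : 1 ≤ pvN (v >>> (7 : Nat)) := le_max_left _ _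
  rw [List.range_succ_eq_map, List.map_cons, List.map_map]
  congr 1
  · simp only [Nat.mul_zero, pvShift_zero]
    split_ifs with hif
    · rfl
    · omega
  · apply List.map_congr_left
    intro i hi
    rw [List.mem_range] at hi
    have hsh : v >>> (7 * (i + 1) : Nat) = (v >>> (7 : Nat)) >>> (7 * i : Nat) := by
      rw [← Int.shiftRight_add]
      congr 1
      omega
    simp only [Function.comp, Nat.succ_eq_add_one, hsh]
    congr 1
    split_ifs <;> omega


theorem pvFuel_decr (v : Int) (h : ¬ (-64 ≤ v ∧ v ≤ 63)) :
    (v >>> (7 : Nat)).natAbs < v.natAbs := by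
  rw [pvShiftR7]
  omega

theorem pvGo (fuel : Nat) : ∀ (v : Int), v.natAbs < fuel →
    pvLebGo fuel v = leb128_encode_signed_alt v := by
  induction fuel with
  | zero => intro v hv; omega
  | succ f ih =>
    intro v hv
    show (if (v >>> (7 : Nat) = 0 ∧ PySem.Int.band (PySem.Int.band v 127) 64 = 0) ∨
             (v >>> (7 : Nat) = -1 ∧ ¬ PySem.Int.band (PySem.Int.band v 127) 64 = 0) then
           [PySem.Int.band v 127]
         else PySem.Int.bor (PySem.Int.band v 127) 128 :: pvLebGo f (v >>> (7 : Nat))) = _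
    rw [if_congr (pvStop_iff v) rfl rfl]
    by_cases h : (-64 ≤ v ∧ v ≤ 63)
    · rw [if_pos h, pvAlt_base v h]
    · have hdec := pvFuel_decr v h
      rw [if_neg h, ih (v >>> (7 : Nat)) (by omega), pvAlt_step v h]

-- ===== VERDICT (by name: the statement is the Claim_ definition above) =====
theorem leb128_encode_signed_spec : Claim_equal_leb128_encode_signed := by
  intro v _
  unfold Spec_leb128_encode_signed
  exact pvGo (v.natAbs + 1) v (by omega)
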